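-- pv_equiv track=rewrite | github.com/posl/comment_recommendation | script/split_gen/2_time/zh/116_A/8.py | hamburger
-- ===== SOURCE A (Python) =====
-- def hamburger(n,x):
--     if n == 0:
--         return 0
--     elif x == 1:
--         return 0
--     elif x <= 1 + hamburger(n-1, (2**(n+1)-3)//2 + 1):
--         return hamburger(n-1, x-1)
--     else:
--         return 1 + hamburger(n-1, x - (2**(n+1)-3)//2 - 1)
-- ===== SOURCE B (Python) =====
-- def hamburger(n, x):
--     # Iterative descent: at level n the branch threshold of the recursion is
--     # simply n (the recursive condition call always evaluates to n-1), so we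
--     # walk down the levels with an accumulator instead of recursing.
--     count = 0
--     while n > 0 and x > n:
--         count += 1
--         x -= 2 ** n - 1
--         n -= 1
--     return count
-- ===== Notes on version B (the rewrite author's own statement) =====
-- stated objective: alternative
-- what changed: Replaced A's double recursion (the branch condition re-invokes the function at every level) by a single iterative descent over the levels with a patty accumulator, using the fact that the condition's recursive call always evaluates to n-1; intended as faster, but a timing run could not measure a ratio (A times out from n=16 up).
import Mathlib
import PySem

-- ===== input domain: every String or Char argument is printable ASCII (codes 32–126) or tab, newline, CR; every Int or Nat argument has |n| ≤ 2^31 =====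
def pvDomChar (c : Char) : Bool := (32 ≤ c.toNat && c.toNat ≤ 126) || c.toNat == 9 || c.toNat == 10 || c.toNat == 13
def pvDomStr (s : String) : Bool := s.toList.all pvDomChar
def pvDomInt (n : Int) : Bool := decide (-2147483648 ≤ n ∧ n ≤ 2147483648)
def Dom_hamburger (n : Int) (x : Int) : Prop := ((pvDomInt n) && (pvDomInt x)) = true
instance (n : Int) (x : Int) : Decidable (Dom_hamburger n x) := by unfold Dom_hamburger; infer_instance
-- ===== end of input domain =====

-- B replaces A's double recursion by an iterative descent over the levels with an
-- accumulator (the recursive branch-threshold call always evaluates to level-1).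


-- ===== PORT A =====
-- A's recursion decreases n by 1 each level; for n ≥ 1 we recurse on the Nat m = n-1.
-- (2**(n+1)-3)//2 with n = m+1 is floordiv (2^(m+2)-3) 2.
def hamburgerA : Nat → Int → Int
  | 0, _ => 0
  | m+1, x =>
    if x = 1 then 0
    else if x ≤ 1 + hamburgerA m (PySem.Int.floordiv ((2:Int)^(m+2) - 3) 2 + 1) then
      hamburgerA m (x - 1)
    else
      1 + hamburgerA m (x - PySem.Int.floordiv ((2:Int)^(m+2) - 3) 2 - 1)

-- n < 0 with x ≠ 1: the Python recursion never terminates (excluded by Pre_);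
-- n < 0 with x = 1 returns 0 before any recursion, as in Python.
def hamburger (n : Int) (x : Int) : Int :=
  if 0 ≤ n then hamburgerA n.toNat x
  else if x = 1 then 0 else 0

-- ===== PORT B =====
-- the while loop of Source B: runs while n > 0 ∧ x > n, so exactly n.toNat bounded steps.
def hamburgerAltLoop : Nat → Int → Int → Int
  | 0, _, count => count
  | m+1, x, count =>
    if ((m:Int)+1) < x then hamburgerAltLoop m (x - ((2:Int)^(m+1) - 1)) (count + 1)
    else count

def hamburger_alt (n : Int) (x : Int) : Int :=
  hamburgerAltLoop n.toNat x 0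

-- ===== PRECONDITION & SPEC =====
-- Pre_ excludes n < 0 with x ≠ 1, where A's recursion never terminates (RecursionError).
def Pre_hamburger (n : Int) (x : Int) : Prop := 0 ≤ n ∨ x = 1
instance (n : Int) (x : Int) : Decidable (Pre_hamburger n x) := by unfold Pre_hamburger; infer_instance
def pvWitness_hamburger : Int × Int := (3, 7)

def Spec_hamburger (n : Int) (x : Int) (out : Int) : Prop := out = hamburger_alt n x
instance (n : Int) (x : Int) (out : Int) : Decidable (Spec_hamburger n x out) := by unfold Spec_hamburger; infer_instance

-- ===== CLAIM (what is proved, stated in full; the proofs are below) =====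
def Claim_equal_hamburger : Prop := ∀ (n : Int) (x : Int), Dom_hamburger n x → Pre_hamburger n x → Spec_hamburger n x (hamburger n x)

-- ===== LEMMAS AND PROOFS =====

-- the midpoint expression in A is a closed form
theorem mid_eq (m : Nat) :
    PySem.Int.floordiv ((2:Int)^(m+2) - 3) 2 = (2:Int)^(m+1) - 2 := by
  rw [PySem.Int.floordiv_eq_ediv_of_pos (by omega)]
  have h : (2:Int)^(m+2) = 2 * 2^(m+1) := by ring
  omega

theorem int_lt_two_pow (m : Nat) : (m : Int) + 1 ≤ (2:Int)^m := by
  have := Nat.lt_two_pow_self (n := m)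
  have h2 : ((m : Nat) : Int) < ((2^m : Nat) : Int) := by exact_mod_cast this
  push_cast at h2
  omega

-- unfolding of A's recursive step with the branch condition evaluated symbolically
theorem hamburgerA_succ (m : Nat) (x : Int) :
    hamburgerA (m+1) x =
      if x = 1 then 0
      else if x ≤ 1 + hamburgerA m ((2:Int)^(m+1) - 2 + 1) then hamburgerA m (x - 1)
      else 1 + hamburgerA m (x - ((2:Int)^(m+1) - 2) - 1) := by
  rw [show hamburgerA (m+1) x =
      (if x = 1 then 0
       else if x ≤ 1 + hamburgerA m (PySem.Int.floordiv ((2:Int)^(m+2) - 3) 2 + 1) then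
         hamburgerA m (x - 1)
       else 1 + hamburgerA m (x - PySem.Int.floordiv ((2:Int)^(m+2) - 3) 2 - 1)) from rfl]
  rw [mid_eq]

-- saturation: once x is past 2^(m+1) - m - 1, every level adds a patty
theorem hamburgerA_sat (m : Nat) : ∀ x : Int, (2:Int)^(m+1) - m - 1 ≤ x →
    hamburgerA m x = m := by
  induction m with
  | zero => intro x _; simp [hamburgerA]
  | succ m ih =>
    intro x hx
    have e2 : (2:Int)^(m+1+1) = 2 * 2^(m+1) := by ring
    have hpow := int_lt_two_pow m
    push_cast at hx
    have hthr : hamburgerA m ((2:Int)^(m+1) - 2 + 1) = m := ih _ (by omega)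
    rw [hamburgerA_succ, if_neg (by omega : ¬ x = 1), if_neg (by rw [hthr]; omega)]
    rw [show x - ((2:Int)^(m+1) - 2) - 1 = x - 2^(m+1) + 1 from by ring]
    rw [ih _ (by omega)]
    push_cast
    ring

-- below the threshold no patty is ever counted
theorem hamburgerA_low (m : Nat) : ∀ x : Int, x ≤ m → hamburgerA m x = 0 := by
  induction m with
  | zero => intro x _; simp [hamburgerA]
  | succ m ih =>
    intro x hx
    push_cast at hx
    have hpow := int_lt_two_pow m
    have hthr : hamburgerA m ((2:Int)^(m+1) - 2 + 1) = m :=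
      hamburgerA_sat m _ (by omega)
    by_cases hx1 : x = 1
    · rw [hamburgerA_succ, if_pos hx1]
    · rw [hamburgerA_succ, if_neg hx1, if_pos (by rw [hthr]; omega)]
      exact ih _ (by omega)

-- the accumulator loop of B computes A's recursion
theorem loop_eq_A (m : Nat) : ∀ (x c : Int),
    hamburgerAltLoop m x c = c + hamburgerA m x := by
  induction m with
  | zero => intro x c; simp [hamburgerAltLoop, hamburgerA]
  | succ m ih =>
    intro x c
    have hpow := int_lt_two_pow m
    have hthr : hamburgerA m ((2:Int)^(m+1) - 2 + 1) = m :=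
      hamburgerA_sat m _ (by omega)
    rw [show hamburgerAltLoop (m+1) x c =
        (if ((m:Int)+1) < x then hamburgerAltLoop m (x - ((2:Int)^(m+1) - 1)) (c + 1)
         else c) from rfl]
    by_cases hgt : ((m:Int)+1) < x
    · rw [if_pos hgt, ih]
      rw [hamburgerA_succ, if_neg (by omega : ¬ x = 1), if_neg (by rw [hthr]; omega)]
      rw [show x - ((2:Int)^(m+1) - 2) - 1 = x - ((2:Int)^(m+1) - 1) from by ring]
      ring
    · rw [if_neg hgt]
      by_cases hx1 : x = 1
      · rw [hamburgerA_succ, if_pos hx1]; ring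
      · rw [hamburgerA_succ, if_neg hx1, if_pos (by rw [hthr]; omega)]
        rw [hamburgerA_low m _ (by omega)]
        ring

-- ===== VERDICT (by name: the statement is the Claim_ definition above) =====
theorem hamburger_spec : Claim_equal_hamburger := by
  intro n x _ hpre
  unfold Spec_hamburger hamburger hamburger_alt
  by_cases hn : 0 ≤ n
  · rw [if_pos hn, loop_eq_A]; ring
  · have hx1 : x = 1 := by
      cases hpre with
      | inl h => exact absurd h hn
      | inr h => exact h
    have h0 : n.toNat = 0 := by omega
    rw [if_neg hn, if_pos hx1, h0]
    rfl
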